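-- pv_equiv track=rewrite | github.com/PalampurRockstar/Algorithm | src/main/python/algo/medium/hashset/KSumSubSet.py | findByRec
-- ===== SOURCE A (Python) =====
-- def findByRec(input, target, found, k):
--     length = len(input)
--     if length == 0: return []
--     if k == 2:
--         return findDoublet(input, target, found)
--     result = []
--     for i in range(length):
--         including = findByRec(input[i + 1:], target - input[i], found + input[i:i + 1], k - 1)
--         for i in including: result.append(i)
--     return result
--
-- def findDoublet(input, target, found):
--     length = len(input)
--     right = length - 1
--     left = 0
--     result = []
--     while left < right:
--         if input[left] + input[right] == target:
--             result.append((found + [input[left], input[right]]))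
--             left += 1
--             right -= 1
--         elif input[left] + input[right] < target:
--             left += 1
--         else:
--             right -= 1
--
--     return result
-- ===== SOURCE B (Python) =====
-- def findByRec(input, target, found, k):
--     # Iterative breadth-first expansion instead of depth-first recursion:
--     # keep a worklist of (suffix, remaining target, chosen prefix) states,
--     # expand it k-2 times, then solve each state with the two-pointer base case.
--     if len(input) == 0 or k < 2:
--         return []
--     states = [(input, target, found)]
--     rounds = k - 2
--     while rounds > 0 and states:
--         states = [(s[i + 1:], t - s[i], f + [s[i]])
--                   for (s, t, f) in states for i in range(len(s))]
--         rounds -= 1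
--     result = []
--     for (s, t, f) in states:
--         result.extend(findDoublet(s, t, f))
--     return result
--
-- def findDoublet(input, target, found):
--     length = len(input)
--     right = length - 1
--     left = 0
--     result = []
--     while left < right:
--         if input[left] + input[right] == target:
--             result.append(found + [input[left], input[right]])
--             left += 1
--             right -= 1
--         elif input[left] + input[right] < target:
--             left += 1
--         else:
--             right -= 1
--     return result
-- ===== Notes on version B (the rewrite author's own statement) =====
-- stated objective: alternative
-- what changed: Replaces A's depth-first recursion with an iterative breadth-first worklist: a list of (suffix, remaining-target, prefix) states is expanded k-2 times and each final state is solved by the unchanged two-pointer doublet scan; B also returns [] immediately when k < 2 instead of A's exhaustive empty recursion.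
import Mathlib
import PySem

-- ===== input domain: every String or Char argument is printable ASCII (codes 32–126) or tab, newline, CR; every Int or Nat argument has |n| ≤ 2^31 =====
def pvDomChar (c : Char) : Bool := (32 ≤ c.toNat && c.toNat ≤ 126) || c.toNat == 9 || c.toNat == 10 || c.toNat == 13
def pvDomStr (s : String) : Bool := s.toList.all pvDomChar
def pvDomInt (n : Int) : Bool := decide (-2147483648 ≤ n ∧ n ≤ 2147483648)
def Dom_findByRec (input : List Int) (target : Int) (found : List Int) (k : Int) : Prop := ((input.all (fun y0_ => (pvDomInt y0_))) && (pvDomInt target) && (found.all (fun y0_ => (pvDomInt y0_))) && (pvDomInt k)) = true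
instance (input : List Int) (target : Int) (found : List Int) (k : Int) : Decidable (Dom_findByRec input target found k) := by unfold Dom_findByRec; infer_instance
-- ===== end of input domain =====

-- B replaces A's depth-first recursion by an iterative breadth-first worklist of
-- (suffix, remaining-target, prefix) states expanded k-2 times (objective: alternative).

-- ===== PORT A =====
-- findDoublet's while-loop (identical helper in both Python sources); indices left/right
-- are always in range when read (0 ≤ left < right ≤ len-1), so pyGetD's default is unreachable.
def doubletLoop (input : List Int) (target : Int) (found : List Int)
    (left right : Int) (result : List (List Int)) : List (List Int) :=
  if left < right then
    if PySem.List.pyGetD input left 0 + PySem.List.pyGetD input right 0 = target then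
      doubletLoop input target found (left + 1) (right - 1)
        (result ++ [found ++ [PySem.List.pyGetD input left 0, PySem.List.pyGetD input right 0]])
    else if PySem.List.pyGetD input left 0 + PySem.List.pyGetD input right 0 < target then
      doubletLoop input target found (left + 1) right result
    else
      doubletLoop input target found left (right - 1) result
  else result
termination_by (right - left).toNat
decreasing_by all_goals omega

def findDoubletP (input : List Int) (target : Int) (found : List Int) : List (List Int) :=
  doubletLoop input target found 0 ((input.length : Int) - 1) []

-- 'input[i+1:]' for the termination proof: it is a strict sublist when input is nonempty.
theorem pv_slice_len_lt (input : List Int) (i : Nat) (h : input.length ≠ 0) :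
    (PySem.List.slice input (some ((i + 1 : Nat) : Int)) none).length < input.length := by
  rw [PySem.List.slice_from_natCast]
  simp only [List.length_drop]
  omega

def findByRec (input : List Int) (target : Int) (found : List Int) (k : Int) : List (List Int) :=
  if h : input.length = 0 then []
  else if k = 2 then findDoubletP input target found
  else
    (List.range input.length).attach.foldl
      (fun result i =>
        result ++ findByRec (PySem.List.slice input (some ((i.1 + 1 : Nat) : Int)) none)
          (target - PySem.List.pyGetD input (i.1 : Int) 0)
          (found ++ PySem.List.slice input (some ((i.1 : Nat) : Int)) (some ((i.1 + 1 : Nat) : Int)))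
          (k - 1)) []
termination_by input.length
decreasing_by exact pv_slice_len_lt input i.1 h

-- ===== PORT B =====
-- one round of the worklist comprehension:
-- states = [(s[i+1:], t - s[i], f + [s[i]]) for (s, t, f) in states for i in range(len(s))]
def stepStates (states : List (List Int × Int × List Int)) : List (List Int × Int × List Int) :=
  states.flatMap (fun st =>
    (List.range st.1.length).map (fun i =>
      (PySem.List.slice st.1 (some ((i + 1 : Nat) : Int)) none,
       st.2.1 - PySem.List.pyGetD st.1 (i : Int) 0,
       st.2.2 ++ [PySem.List.pyGetD st.1 (i : Int) 0])))

-- 'while rounds > 0 and states: states = step(states); rounds -= 1'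
def bLoop (rounds : Int) (states : List (List Int × Int × List Int)) :
    List (List Int × Int × List Int) :=
  if 0 < rounds ∧ states ≠ [] then bLoop (rounds - 1) (stepStates states) else states
termination_by rounds.toNat
decreasing_by omega

def findByRec_alt (input : List Int) (target : Int) (found : List Int) (k : Int) : List (List Int) :=
  if input.length = 0 ∨ k < 2 then []
  else
    (bLoop (k - 2) [(input, target, found)]).foldl
      (fun result st => result ++ findDoubletP st.1 st.2.1 st.2.2) []

-- ===== PRECONDITION & SPEC =====
def Spec_findByRec (input : List Int) (target : Int) (found : List Int) (k : Int) (out : List (List Int)) : Prop := out = findByRec_alt input target found k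
instance (input : List Int) (target : Int) (found : List Int) (k : Int) (out : List (List Int)) : Decidable (Spec_findByRec input target found k out) := by unfold Spec_findByRec; infer_instance

-- ===== CLAIM (what is proved, stated in full; the proofs are below) =====
def Claim_equal_findByRec : Prop := ∀ (input : List Int) (target : Int) (found : List Int) (k : Int), Dom_findByRec input target found k → Spec_findByRec input target found k (findByRec input target found k)

-- ===== LEMMAS AND PROOFS =====

-- pure (break-free) iteration of stepStates
def iterN : Nat → List (List Int × Int × List Int) → List (List Int × Int × List Int)
  | 0, s => s
  | n + 1, s => iterN n (stepStates s)

-- F: solve every final state with the doublet scan, in order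
def solveAll (states : List (List Int × Int × List Int)) : List (List Int) :=
  states.flatMap (fun st => findDoubletP st.1 st.2.1 st.2.2)

theorem stepStates_nil : stepStates [] = [] := by simp [stepStates]

theorem iterN_nil : ∀ n, iterN n [] = [] := by
  intro n; induction n with
  | zero => rfl
  | succ n ih => simpa [iterN, stepStates_nil] using ih

theorem bLoop_eq_iterN (m : Int) (states : List (List Int × Int × List Int)) :
    bLoop m states = iterN m.toNat states := by
  generalize hn : m.toNat = n
  induction n generalizing m states with
  | zero =>
      rw [bLoop]
      have h' : ¬ (0 < m) := by omega
      simp only [h', false_and, if_false]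
      rfl
  | succ n ih =>
      have hm : 0 < m := by omega
      rw [bLoop]
      by_cases hs : states = []
      · subst hs
        simp [hm, iterN_nil]
      · have h1 : (m - 1).toNat = n := by omega
        simp only [hm, hs, ne_eq, not_false_eq_true, and_self, if_true]
        rw [ih (m - 1) (stepStates states) h1]
        rfl

theorem iterN_flatMap {α : Type} (n : Nat) (xs : List α)
    (h : α → List (List Int × Int × List Int)) :
    iterN n (xs.flatMap h) = xs.flatMap (fun x => iterN n (h x)) := by
  induction n generalizing h with
  | zero => rfl
  | succ n ih =>
      show iterN n (stepStates (xs.flatMap h)) = _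
      have hstep : stepStates (xs.flatMap h) = xs.flatMap (fun x => stepStates (h x)) := by
        simp [stepStates, List.flatMap_assoc]
      rw [hstep, ih (fun x => stepStates (h x))]
      rfl

theorem solveAll_flatMap {α : Type} (xs : List α)
    (h : α → List (List Int × Int × List Int)) :
    solveAll (xs.flatMap h) = xs.flatMap (fun x => solveAll (h x)) := by
  simp [solveAll, List.flatMap_assoc]

theorem findDoubletP_nil (t : Int) (f : List Int) : findDoubletP [] t f = [] := by
  rw [findDoubletP, doubletLoop]
  norm_num

-- A returns [] whenever k < 2: the recursion only bottoms out at empty suffixes.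
theorem findByRec_of_k_lt_two : ∀ (n : Nat) (s : List Int), s.length ≤ n →
    ∀ (t : Int) (f : List Int) (k : Int), k < 2 → findByRec s t f k = [] := by
  intro n
  induction n with
  | zero =>
      intro s hs t f k hk
      have h0 : s.length = 0 := by omega
      rw [findByRec, dif_pos h0]
  | succ n ih =>
      intro s hs t f k hk
      rw [findByRec]
      by_cases h0 : s.length = 0
      · rw [dif_pos h0]
      · have hk2 : ¬ k = 2 := by omega
        rw [dif_neg h0, if_neg hk2]
        rw [PySem.List.foldl_append_eq_flatMap]
        have : ∀ i ∈ (List.range s.length).attach,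
            findByRec (PySem.List.slice s (some ((i.1 + 1 : Nat) : Int)) none)
              (t - PySem.List.pyGetD s (i.1 : Int) 0)
              (f ++ PySem.List.slice s (some ((i.1 : Nat) : Int)) (some ((i.1 + 1 : Nat) : Int)))
              (k - 1) = [] := by
          intro i _
          apply ih
          · rw [PySem.List.slice_from_natCast]
            simp only [List.length_drop]
            omega
          · omega
        rw [List.nil_append, List.flatMap_eq_nil_iff]
        exact this

-- children generated by A's loop body = one stepStates round on the singleton state
theorem step_singleton (s : List Int) (t : Int) (f : List Int) :
    stepStates [(s, t, f)] =
      (List.range s.length).map (fun i =>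
        (PySem.List.slice s (some ((i + 1 : Nat) : Int)) none,
         t - PySem.List.pyGetD s (i : Int) 0,
         f ++ [PySem.List.pyGetD s (i : Int) 0])) := by
  simp [stepStates]

-- A's 'found + input[i:i+1]' equals B's 'f + [s[i]]' for i < len
theorem slice_one_eq_singleton (s : List Int) (i : Nat) (hi : i < s.length) :
    PySem.List.slice s (some ((i : Nat) : Int)) (some ((i + 1 : Nat) : Int)) =
      [PySem.List.pyGetD s (i : Int) 0] := by
  have h1 : ((i + 1 : Nat) : Int) = ((i : Nat) : Int) + ((1 : Nat) : Int) := by push_cast; ring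
  rw [h1, PySem.List.slice_natCast_add, PySem.List.pyGetD_natCast]
  have h2 : s.getD i 0 = s[i] := by simp [List.getD_eq_getElem?_getD, hi]
  rw [h2, List.drop_eq_getElem_cons hi]
  rfl

-- MAIN: for k = m+2, A's recursion equals m rounds of worklist expansion + doublet solving.
theorem findByRec_eq_solveAll (m : Nat) :
    ∀ (s : List Int) (t : Int) (f : List Int),
      findByRec s t f ((m : Int) + 2) = solveAll (iterN m [(s, t, f)]) := by
  induction m with
  | zero =>
      intro s t f
      rw [findByRec]
      by_cases h0 : s.length = 0
      · have : s = [] := List.length_eq_zero_iff.mp h0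
        subst this
        simp [h0, iterN, solveAll, findDoubletP_nil]
      · simp [h0, iterN, solveAll]
  | succ m ih =>
      intro s t f
      have hk2 : ¬ ((m + 1 : Nat) : Int) + 2 = 2 := by push_cast; omega
      rw [findByRec]
      by_cases h0 : s.length = 0
      · have hs : s = [] := List.length_eq_zero_iff.mp h0
        subst hs
        rw [dif_pos h0]
        have hstep : stepStates [(([] : List Int), t, f)] = [] := by simp [stepStates]
        show ([] : List (List Int)) = solveAll (iterN m (stepStates [([], t, f)]))
        rw [hstep, iterN_nil]
        rfl
      · have hk1 : ((m + 1 : Nat) : Int) + 2 - 1 = (m : Int) + 2 := by push_cast; ring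
        rw [dif_neg h0, if_neg hk2]
        rw [PySem.List.foldl_append_eq_flatMap, List.nil_append]
        have hbody : ∀ i ∈ (List.range s.length).attach,
            findByRec (PySem.List.slice s (some ((i.1 + 1 : Nat) : Int)) none)
              (t - PySem.List.pyGetD s (i.1 : Int) 0)
              (f ++ PySem.List.slice s (some ((i.1 : Nat) : Int)) (some ((i.1 + 1 : Nat) : Int)))
              (((m + 1 : Nat) : Int) + 2 - 1) =
            solveAll (iterN m [(PySem.List.slice s (some ((i.1 + 1 : Nat) : Int)) none,
              t - PySem.List.pyGetD s (i.1 : Int) 0,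
              f ++ [PySem.List.pyGetD s (i.1 : Int) 0])]) := by
          intro i hi
          have hlt : i.1 < s.length := List.mem_range.mp i.2
          rw [hk1, slice_one_eq_singleton s i.1 hlt, ih]
        rw [List.flatMap_congr hbody]
        show _ = solveAll (iterN m (stepStates [(s, t, f)]))
        rw [step_singleton]
        have hmap : (List.range s.length).map (fun i =>
              (PySem.List.slice s (some ((i + 1 : Nat) : Int)) none,
               t - PySem.List.pyGetD s (i : Int) 0,
               f ++ [PySem.List.pyGetD s (i : Int) 0])) =
            (List.range s.length).flatMap (fun i =>
              [(PySem.List.slice s (some ((i + 1 : Nat) : Int)) none,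
                t - PySem.List.pyGetD s (i : Int) 0,
                f ++ [PySem.List.pyGetD s (i : Int) 0])]) :=
          List.map_eq_flatMap
        rw [hmap, iterN_flatMap, solveAll_flatMap]
        conv_rhs => rw [← List.attach_map_subtype_val (List.range s.length)]
        rw [List.flatMap_map]

-- ===== VERDICT (by name: the statement is the Claim_ definition above) =====
theorem findByRec_spec : Claim_equal_findByRec := by
  unfold Claim_equal_findByRec
  intro input target found k _
  unfold Spec_findByRec findByRec_alt
  by_cases h0 : input.length = 0
  · have : input = [] := List.length_eq_zero_iff.mp h0
    subst this
    rw [findByRec]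
    simp
  · by_cases hk : k < 2
    · rw [findByRec_of_k_lt_two input.length input le_rfl target found k hk]
      simp [h0, hk]
    · have hk2 : 2 ≤ k := by omega
      have hm : k = ((k - 2).toNat : Int) + 2 := by omega
      rw [if_neg (by simp [h0, hk] : ¬ (input.length = 0 ∨ k < 2))]
      rw [PySem.List.foldl_append_eq_flatMap, List.nil_append]
      rw [bLoop_eq_iterN]
      have := findByRec_eq_solveAll (k - 2).toNat input target found
      rw [← hm] at this
      rw [this]
      rfl
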